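-- pv_equiv track=rewrite | github.com/MrBrantCode/unitest_baseline | mut_generate/mist_train_cf/cf_53602/solution.py | is_product_of_three_primes
-- ===== SOURCE A (Python) =====
-- def is_product_of_three_primes(n):
--     primes = [2, 3, 5, 7, 11, 13, 17, 19, 23, 29, 31, 37, 41, 43, 47, 53, 59, 61, 67, 71, 73, 79, 83, 89, 97]
--     prime_factors = 0
--
--     for prime in primes:
--         while n % prime == 0:
--             n = n // prime
--             prime_factors += 1
--
--     return prime_factors == 3 and n == 1
-- ===== SOURCE B (Python) =====
-- def is_product_of_three_primes(n):
--     primes = [2, 3, 5, 7, 11, 13, 17, 19, 23, 29, 31, 37, 41, 43, 47, 53, 59, 61, 67, 71, 73, 79, 83, 89, 97]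
--     return any(p * q * r == n for p in primes for q in primes for r in primes)
-- ===== Notes on version B (the rewrite author's own statement) =====
-- stated objective: alternative
-- what changed: Replaces A's trial-division factor-counting loop (nested while dividing n by each prime) with a generate-and-test scan: check whether any product p*q*r of three primes from the fixed list equals n; no division and no running counter. Pre_ excludes only n = 0, on which A loops forever (0 % p == 0 and 0 // p == 0), while B returns False.
-- outside the precondition, e.g. on is_product_of_three_primes(0): A does not finish within the time limit, B returns False
import Mathlib
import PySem

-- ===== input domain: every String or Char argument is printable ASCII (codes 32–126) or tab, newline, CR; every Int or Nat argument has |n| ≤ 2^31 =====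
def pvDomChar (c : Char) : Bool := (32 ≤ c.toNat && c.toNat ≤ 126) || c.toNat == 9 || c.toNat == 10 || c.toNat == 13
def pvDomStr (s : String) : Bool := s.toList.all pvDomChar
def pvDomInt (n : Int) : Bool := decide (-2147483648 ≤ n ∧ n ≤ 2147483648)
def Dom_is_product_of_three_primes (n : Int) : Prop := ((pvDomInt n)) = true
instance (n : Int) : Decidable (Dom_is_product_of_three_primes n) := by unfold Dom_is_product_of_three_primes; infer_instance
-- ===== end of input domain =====

-- B replaces A's trial-division factor-counting loop by a generate-and-test scan over
-- all triples of primes from the same fixed list (objective: alternative algorithm).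

-- the fixed prime list both Python versions write out literally
def pvPrimes : List Int := [2, 3, 5, 7, 11, 13, 17, 19, 23, 29, 31, 37, 41, 43, 47, 53, 59, 61, 67, 71, 73, 79, 83, 89, 97]

-- ===== PORT A =====
-- the inner `while n % prime == 0: n = n // prime; prime_factors += 1` loop;
-- the guards 2 ≤ p and n ≠ 0 only make it total (Python diverges at n = 0, excluded by Pre_)
def pvDivOut (p n c : Int) : Int × Int :=
  if h : 2 ≤ p ∧ n ≠ 0 ∧ PySem.Int.mod n p = 0 then
    pvDivOut p (PySem.Int.floordiv n p) (c + 1)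
  else (n, c)
termination_by n.natAbs
decreasing_by
  obtain ⟨hp, hn, hm⟩ := h
  rw [PySem.Int.mod_eq_zero_iff_dvd] at hm
  obtain ⟨k, hk⟩ := hm
  have hk0 : k ≠ 0 := by rintro rfl; simp at hk; exact hn hk
  rw [PySem.Int.floordiv_eq_ediv_of_pos (by omega), hk,
    Int.mul_ediv_cancel_left _ (by omega : p ≠ 0), Int.natAbs_mul]
  have h2 : 2 ≤ p.natAbs := by omega
  have h1 : 1 ≤ k.natAbs := by omega
  nlinarith

def is_product_of_three_primes (n : Int) : Bool :=
  let st := pvPrimes.foldl (fun st prime => pvDivOut prime st.1 st.2) (n, 0)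
  st.2 == 3 && st.1 == 1

-- ===== PORT B =====
def is_product_of_three_primes_alt (n : Int) : Bool :=
  pvPrimes.any fun p => pvPrimes.any fun q => pvPrimes.any fun r => p * q * r == n

-- ===== PRECONDITION & SPEC =====
-- Pre_ excludes only n = 0, on which Python A never returns (0 % p == 0 and 0 // p == 0
-- make the first while loop run forever); B returns False there.
def Pre_is_product_of_three_primes (n : Int) : Prop := n ≠ 0
instance (n : Int) : Decidable (Pre_is_product_of_three_primes n) := by unfold Pre_is_product_of_three_primes; infer_instance
def pvWitness_is_product_of_three_primes : Int := 30

def Spec_is_product_of_three_primes (n : Int) (out : Bool) : Prop := out = is_product_of_three_primes_alt n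
instance (n : Int) (out : Bool) : Decidable (Spec_is_product_of_three_primes n out) := by unfold Spec_is_product_of_three_primes; infer_instance

-- ===== CLAIM (what is proved, stated in full; the proofs are below) =====
def Claim_equal_is_product_of_three_primes : Prop := ∀ (n : Int), Dom_is_product_of_three_primes n → Pre_is_product_of_three_primes n → Spec_is_product_of_three_primes n (is_product_of_three_primes n)

-- ===== LEMMAS AND PROOFS =====

-- specification of the inner divide-out loop
theorem pvDivOut_spec (p n c : Int) (hp : 2 ≤ p) (hn : n ≠ 0) :
    ∃ e : ℕ, (pvDivOut p n c).1 * p ^ e = n ∧ (pvDivOut p n c).2 = c + e ∧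
      ¬ p ∣ (pvDivOut p n c).1 ∧ (pvDivOut p n c).1 ≠ 0 := by
  suffices H : ∀ (N : ℕ) (n c : Int), n.natAbs ≤ N → n ≠ 0 →
      ∃ e : ℕ, (pvDivOut p n c).1 * p ^ e = n ∧ (pvDivOut p n c).2 = c + e ∧
        ¬ p ∣ (pvDivOut p n c).1 ∧ (pvDivOut p n c).1 ≠ 0 from
    H n.natAbs n c le_rfl hn
  intro N
  induction N with
  | zero => intro n c hN hn; omega
  | succ N ih =>
    intro n c hN hn
    rw [pvDivOut]
    split
    · rename_i h
      obtain ⟨-, -, hm⟩ := h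
      obtain ⟨k, hk⟩ := (PySem.Int.mod_eq_zero_iff_dvd n p).1 hm
      have hk0 : k ≠ 0 := by rintro rfl; simp at hk; exact hn hk
      have hfl : PySem.Int.floordiv n p = k := by
        rw [PySem.Int.floordiv_eq_ediv_of_pos (by omega), hk,
          Int.mul_ediv_cancel_left _ (by omega : p ≠ 0)]
      have h2 : 2 ≤ p.natAbs := by omega
      have h1 : 1 ≤ k.natAbs := by omega
      have habs : n.natAbs = p.natAbs * k.natAbs := by rw [hk, Int.natAbs_mul]
      have hlt : k.natAbs < n.natAbs := by nlinarith
      obtain ⟨e, he1, he2, he3, he4⟩ := ih k (c + 1) (by omega) hk0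
      refine ⟨e + 1, ?_, ?_, ?_, ?_⟩
      · rw [hfl, pow_succ, ← mul_assoc, he1, hk]; ring
      · rw [hfl, he2]; push_cast; ring
      · rw [hfl]; exact he3
      · rw [hfl]; exact he4
    · rename_i h
      have hnd : ¬ p ∣ n := by
        intro hd
        exact h ⟨hp, hn, (PySem.Int.mod_eq_zero_iff_dvd n p).2 hd⟩
      exact ⟨0, by simp, by simp, hnd, hn⟩

-- invariant of the outer fold over the prime list
theorem pvFold_spec (l : List Int) : ∀ (m c : Int), (∀ p ∈ l, 2 ≤ p) → m ≠ 0 →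
    ∃ L : List Int, (∀ x ∈ L, x ∈ l) ∧
      (l.foldl (fun st prime => pvDivOut prime st.1 st.2) (m, c)).1 * L.prod = m ∧
      (l.foldl (fun st prime => pvDivOut prime st.1 st.2) (m, c)).2 = c + L.length ∧
      (l.foldl (fun st prime => pvDivOut prime st.1 st.2) (m, c)).1 ≠ 0 ∧
      (∀ p ∈ l, ¬ p ∣ (l.foldl (fun st prime => pvDivOut prime st.1 st.2) (m, c)).1) := by
  induction l with
  | nil => intro m c _ hm; exact ⟨[], by simp, by simp, by simp, hm, by simp⟩
  | cons a t ih =>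
    intro m c hl hm
    have ha : 2 ≤ a := hl a (by simp)
    obtain ⟨e, he1, he2, he3, he4⟩ := pvDivOut_spec a m c ha hm
    obtain ⟨L, hL1, hL2, hL3, hL4, hL5⟩ :=
      ih (pvDivOut a m c).1 (pvDivOut a m c).2 (fun p hp => hl p (by simp [hp])) he4
    simp only [List.foldl_cons]
    rw [show pvDivOut a m c = ((pvDivOut a m c).1, (pvDivOut a m c).2) from rfl] at *
    refine ⟨L ++ List.replicate e a, ?_, ?_, ?_, hL4, ?_⟩
    · intro x hx
      rcases List.mem_append.1 hx with hx | hx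
      · exact List.mem_cons_of_mem _ (hL1 x hx)
      · simp [List.eq_of_mem_replicate hx]
    · rw [List.prod_append, List.prod_replicate, ← mul_assoc, hL2, he1]
    · rw [hL3, he2]; simp; ring
    · intro p hp
      rcases List.mem_cons.1 hp with rfl | hp
      · intro hdvd
        exact he3 (hdvd.trans ⟨L.prod, hL2.symm⟩)
      · exact hL5 p hp

theorem pvPrimes_ge_two : ∀ p ∈ pvPrimes, 2 ≤ p := by decide

theorem pvPrimes_natAbs_prime : ∀ p ∈ pvPrimes, Nat.Prime p.natAbs := by decide

theorem pvCast_prod (L : List Int) (h : ∀ x ∈ L, 0 ≤ x) :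
    ((L.map Int.natAbs).prod : Int) = L.prod := by
  induction L with
  | nil => simp
  | cons a t ih =>
    have ha : 0 ≤ a := h a (by simp)
    simp only [List.map_cons, List.prod_cons, Nat.cast_mul,
      ih (fun x hx => h x (by simp [hx]))]
    rw [Int.natAbs_of_nonneg ha]

theorem pvA_true_iff (n : Int) (hn : n ≠ 0) :
    is_product_of_three_primes n = true ↔
      ∃ p ∈ pvPrimes, ∃ q ∈ pvPrimes, ∃ r ∈ pvPrimes, p * q * r = n := by
  obtain ⟨L, hL1, hL2, hL3, hL4, hL5⟩ := pvFold_spec pvPrimes n 0 pvPrimes_ge_two hn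
  set st := pvPrimes.foldl (fun st prime => pvDivOut prime st.1 st.2) (n, 0) with hst
  have hA : is_product_of_three_primes n = (st.2 == 3 && st.1 == 1) := rfl
  constructor
  · intro h
    rw [hA] at h
    simp only [Bool.and_eq_true, beq_iff_eq] at h
    obtain ⟨h3, h1⟩ := h
    have hlen : L.length = 3 := by
      have h30 : (0 : Int) + (L.length : Int) = 3 := by rw [← hL3, h3]
      omega
    obtain ⟨a, b, c, rfl⟩ := List.length_eq_three.1 hlen
    refine ⟨a, hL1 a (by simp), b, hL1 b (by simp), c, hL1 c (by simp), ?_⟩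
    rw [h1] at hL2
    simpa [mul_assoc] using hL2
  · rintro ⟨p, hp, q, hq, r, hr, rfl⟩
    have hp2 : 2 ≤ p := pvPrimes_ge_two p hp
    have hq2 : 2 ≤ q := pvPrimes_ge_two q hq
    have hr2 : 2 ≤ r := pvPrimes_ge_two r hr
    have hLpos : ∀ x ∈ L, 0 < x := fun x hx => by
      have := pvPrimes_ge_two x (hL1 x hx); omega
    have hLprod : 0 < L.prod := List.prod_pos hLpos
    have hnpos : 0 < p * q * r := by positivity
    have hm_pos : 0 < st.1 := by nlinarith [hL2]
    -- st.1 = 1: a prime factor of st.1 would be a small prime dividing st.1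
    have hm1 : st.1 = 1 := by
      by_contra hne
      have habs : st.1.natAbs ≠ 1 := by omega
      obtain ⟨s, hsprime, hsdvd⟩ := Int.exists_prime_and_dvd habs
      have hsn : s ∣ p * q * r := hsdvd.trans ⟨L.prod, hL2.symm⟩
      have hsmall : ∃ t ∈ pvPrimes, t ∣ st.1 := by
        rcases (hsprime.dvd_mul.1 hsn) with hsp | hsr
        · rcases hsprime.dvd_mul.1 hsp with hsp | hsq
          · refine ⟨p, hp, ?_⟩
            have : s.natAbs = p.natAbs :=
              (Nat.prime_dvd_prime_iff_eq (Int.prime_iff_natAbs_prime.1 hsprime)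
                (pvPrimes_natAbs_prime p hp)).1 (Int.natAbs_dvd_natAbs.2 hsp)
            have : p.natAbs ∣ st.1.natAbs := this ▸ Int.natAbs_dvd_natAbs.2 hsdvd
            exact Int.natAbs_dvd_natAbs.1 this
          · refine ⟨q, hq, ?_⟩
            have : s.natAbs = q.natAbs :=
              (Nat.prime_dvd_prime_iff_eq (Int.prime_iff_natAbs_prime.1 hsprime)
                (pvPrimes_natAbs_prime q hq)).1 (Int.natAbs_dvd_natAbs.2 hsq)
            have : q.natAbs ∣ st.1.natAbs := this ▸ Int.natAbs_dvd_natAbs.2 hsdvd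
            exact Int.natAbs_dvd_natAbs.1 this
        · refine ⟨r, hr, ?_⟩
          have : s.natAbs = r.natAbs :=
            (Nat.prime_dvd_prime_iff_eq (Int.prime_iff_natAbs_prime.1 hsprime)
              (pvPrimes_natAbs_prime r hr)).1 (Int.natAbs_dvd_natAbs.2 hsr)
          have : r.natAbs ∣ st.1.natAbs := this ▸ Int.natAbs_dvd_natAbs.2 hsdvd
          exact Int.natAbs_dvd_natAbs.1 this
      obtain ⟨t, ht, htdvd⟩ := hsmall
      exact hL5 t ht htdvd
    -- so L.prod = p * q * r; unique factorization over ℕ gives L.length = 3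
    have hprodL : L.prod = p * q * r := by rw [hm1] at hL2; linarith [hL2]
    have hlen : L.length = 3 := by
      have hcastL : ((L.map Int.natAbs).prod : Int) = L.prod :=
        pvCast_prod L (fun x hx => le_of_lt (hLpos x hx))
      have hprim : ∀ x ∈ L.map Int.natAbs, Nat.Prime x := by
        intro x hx
        obtain ⟨y, hy, rfl⟩ := List.mem_map.1 hx
        exact pvPrimes_natAbs_prime y (hL1 y hy)
      have hNval : (L.map Int.natAbs).prod = (p * q * r).natAbs := by
        have : ((L.map Int.natAbs).prod : Int) = ((p * q * r).natAbs : Int) := by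
          rw [hcastL, hprodL, Int.natAbs_of_nonneg (le_of_lt hnpos)]
        exact_mod_cast this
      have hperm1 : List.Perm (L.map Int.natAbs) (p * q * r).natAbs.primeFactorsList :=
        Nat.primeFactorsList_unique hNval hprim
      have hNval2 : List.prod [p.natAbs, q.natAbs, r.natAbs] = (p * q * r).natAbs := by
        simp [Int.natAbs_mul]; ring
      have hperm2 : List.Perm [p.natAbs, q.natAbs, r.natAbs] (p * q * r).natAbs.primeFactorsList :=
        Nat.primeFactorsList_unique hNval2 (by
          intro x hx
          simp only [List.mem_cons, List.not_mem_nil, or_false] at hx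
          rcases hx with rfl | rfl | rfl
          · exact pvPrimes_natAbs_prime p hp
          · exact pvPrimes_natAbs_prime q hq
          · exact pvPrimes_natAbs_prime r hr)
      have := hperm1.length_eq.trans hperm2.length_eq.symm
      simpa using this
    rw [hA]
    simp only [Bool.and_eq_true, beq_iff_eq]
    exact ⟨by rw [hL3, hlen]; simp, hm1⟩

-- ===== VERDICT (by name: the statement is the Claim_ definition above) =====
theorem is_product_of_three_primes_spec : Claim_equal_is_product_of_three_primes := by
  intro n _ hpre
  unfold Spec_is_product_of_three_primes
  have hA := pvA_true_iff n hpre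
  have hB : is_product_of_three_primes_alt n = true ↔
      ∃ p ∈ pvPrimes, ∃ q ∈ pvPrimes, ∃ r ∈ pvPrimes, p * q * r = n := by
    simp [is_product_of_three_primes_alt, List.any_eq_true, beq_iff_eq]
  rw [Bool.eq_iff_iff, hA, hB]
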